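-- pv_equiv track=rewrite | github.com/EphraiemSarabamoun/cracking-the-coding-interview | moderate/16.11.py | diving_board
-- ===== SOURCE A (Python) =====
-- def diving_board(shorter: int, longer: int, k: int) -> list[int]:
--     if k == 0:
--         return []
--     if shorter == longer:
--         return [k * shorter]
--     lengths = set()
--     for i in range(k + 1):
--         lengths.add(i * shorter + (k - i) * longer)
--     return sorted(lengths)
-- ===== SOURCE B (Python) =====
-- def diving_board(shorter: int, longer: int, k: int) -> list[int]:
--     if k == 0:
--         return []
--     if shorter == longer:
--         return [k * shorter]
--     if k < 0:
--         return []
--     d = shorter - longer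
--     rng = range(k, -1, -1) if d < 0 else range(k + 1)
--     return [k * longer + i * d for i in rng]
-- ===== Notes on version B (the rewrite author's own statement) =====
-- stated objective: faster
-- what changed: Instead of inserting k+1 values into a hash set and sorting them, B generates the arithmetic progression k*longer + i*(shorter-longer) directly in ascending order (iterating i downward when the step is negative), removing both the set and the sort.
import Mathlib
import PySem

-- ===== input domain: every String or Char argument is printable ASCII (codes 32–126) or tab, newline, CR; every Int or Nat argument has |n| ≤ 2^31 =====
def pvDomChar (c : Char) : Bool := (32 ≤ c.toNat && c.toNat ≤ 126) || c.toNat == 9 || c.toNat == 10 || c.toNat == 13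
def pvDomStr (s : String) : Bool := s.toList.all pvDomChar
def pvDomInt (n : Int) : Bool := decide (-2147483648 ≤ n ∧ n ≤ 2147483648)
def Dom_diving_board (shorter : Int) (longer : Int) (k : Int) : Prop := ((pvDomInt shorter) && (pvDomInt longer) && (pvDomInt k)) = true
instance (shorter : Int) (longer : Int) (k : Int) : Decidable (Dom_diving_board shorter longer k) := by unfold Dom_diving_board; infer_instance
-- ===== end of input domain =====

-- B replaces A's hash-set + sort with direct generation of the arithmetic progression in
-- ascending order (objective: faster, O(k) instead of O(k log k)).

-- ===== PORT A =====
def diving_board (shorter : Int) (longer : Int) (k : Int) : List Int :=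
  if k = 0 then []
  else if shorter = longer then [k * shorter]
  else
    let lengths : PySem.Set Int :=
      (PySem.List.pyRange 0 (k + 1) 1).foldl
        (fun s i => PySem.Set.add s (i * shorter + (k - i) * longer)) PySem.Set.empty
    PySem.List.sorted lengths (fun x => x) false

-- ===== PORT B =====
def diving_board_alt (shorter : Int) (longer : Int) (k : Int) : List Int :=
  if k = 0 then []
  else if shorter = longer then [k * shorter]
  else if k < 0 then []
  else
    let d := shorter - longer
    let rng := if d < 0 then PySem.List.pyRange k (-1) (-1) else PySem.List.pyRange 0 (k + 1) 1
    rng.map (fun i => k * longer + i * d)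

-- ===== PRECONDITION & SPEC =====
def Spec_diving_board (shorter : Int) (longer : Int) (k : Int) (out : List Int) : Prop := out = diving_board_alt shorter longer k
instance (shorter : Int) (longer : Int) (k : Int) (out : List Int) : Decidable (Spec_diving_board shorter longer k out) := by unfold Spec_diving_board; infer_instance

-- ===== CLAIM (what is proved, stated in full; the proofs are below) =====
def Claim_equal_diving_board : Prop := ∀ (shorter : Int) (longer : Int) (k : Int), Dom_diving_board shorter longer k → Spec_diving_board shorter longer k (diving_board shorter longer k)

-- ===== LEMMAS AND PROOFS =====

-- A's loop values rewritten in arithmetic-progression form.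
theorem pv_f_eq_g (shorter longer k : Int) :
    (fun i => i * shorter + (k - i) * longer) = (fun i => k * longer + i * (shorter - longer)) := by
  funext i; ring

-- A's set equals the list of progression values over range(k+1), with no duplicates when shorter ≠ longer.
theorem pv_lengths_eq (shorter longer k : Int) (hne : shorter ≠ longer) :
    (PySem.List.pyRange 0 (k + 1) 1).foldl
        (fun s i => PySem.Set.add s (i * shorter + (k - i) * longer)) PySem.Set.empty
      = (PySem.List.pyRange 0 (k + 1) 1).map (fun i => i * shorter + (k - i) * longer) := by
  rw [← PySem.Set.update_map_eq_foldl_add, PySem.Set.update_empty,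
    PySem.Set.ofList_eq_self_of_nodup]
  refine (PySem.List.nodup_pyRange_one 0 (k+1)).map ?_
  intro a b hab
  rw [pv_f_eq_g] at hab
  have hd : shorter - longer ≠ 0 := sub_ne_zero_of_ne hne
  have := add_left_cancel hab
  exact mul_right_cancel₀ hd this

theorem diving_board_spec' (shorter longer k : Int) :
    diving_board shorter longer k = diving_board_alt shorter longer k := by
  unfold diving_board diving_board_alt
  by_cases h0 : k = 0
  · simp [h0]
  by_cases heq : shorter = longer
  · simp [h0, heq]
  simp only [h0, heq, if_false]
  rw [pv_lengths_eq shorter longer k heq]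
  by_cases hk : k < 0
  · rw [PySem.List.pyRange_one_eq_nil (by omega : k + 1 ≤ 0)]
    simp [hk, PySem.List.sorted]
  · simp only [hk, if_false]
    rw [pv_f_eq_g]
    set d := shorter - longer with hdd
    have hd : d ≠ 0 := sub_ne_zero_of_ne heq
    by_cases hdneg : d < 0
    · simp only [hdneg, if_true]
      apply PySem.List.sorted_eq_of_perm_of_pairwise_lt
      · rw [PySem.List.pyRange_neg_one_eq_reverse]
        have : (-1 : Int) + 1 = 0 := by norm_num
        rw [this, List.map_reverse]
        exact (List.reverse_perm _)
      · rw [PySem.List.pyRange_neg_one_eq_reverse]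
        have : (-1 : Int) + 1 = 0 := by norm_num
        rw [this, List.map_reverse, List.pairwise_reverse]
        refine List.Pairwise.map _ ?_ (PySem.List.pairwise_lt_pyRange_one 0 (k+1))
        intro a b hab
        have : b * d < a * d := by
          apply mul_lt_mul_of_neg_right hab hdneg
        simpa using this
    · simp only [hdneg, if_false]
      have hdpos : 0 < d := lt_of_le_of_ne (not_lt.mp hdneg) (Ne.symm hd)
      apply PySem.List.sorted_eq_of_perm_of_pairwise_lt
      · exact List.Perm.refl _
      · refine List.Pairwise.map _ ?_ (PySem.List.pairwise_lt_pyRange_one 0 (k+1))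
        intro a b hab
        have : a * d < b * d := mul_lt_mul_of_pos_right hab hdpos
        simpa using this

-- ===== VERDICT (by name: the statement is the Claim_ definition above) =====
theorem diving_board_spec : Claim_equal_diving_board := by
  intro shorter longer k _
  exact diving_board_spec' shorter longer k
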